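-- pv_equiv track=rewrite | github.com/jkunimune/Djastiz | translator.py | compound
-- ===== SOURCE A (Python) =====
-- def compound(english, components, eng_to_dja={}, pts_o_spch={}):
-- 	"""create a compound word out of several component words"""
-- 	intermediate = components.split(' ') #read the provided list of space-separated English words
-- 	djastiz = ''
-- 	for eng_word in intermediate: #then translate and stack them
-- 		try:
-- 			if djastiz and djastiz[-1] + eng_to_dja[eng_word][0] in ('ng','th','dh','ss','sh','zh'):
-- 				djastiz += "'" + eng_to_dja[eng_word] #use aprostrophes to separate phonemes like ss and h, when necessary
-- 			else:
-- 				djastiz += eng_to_dja[eng_word] #and translate and combine them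
-- 		except KeyError as e:
-- 			raise ValueError("The word for '{}' relies on the nonexistent word for {}".format(english, e))
--
-- 	root_part = pts_o_spch[eng_to_dja[intermediate[-1]]] #the part of speech is based on the part of the first word
-- 	if root_part == 'pronoun': 				root_part = 'noun' #compound pronouns that get used in compounds should be called nouns
-- 	elif root_part == 'fastener': 			root_part = 'modifier' #fasteners become modifiers when combined with other words
-- 	whole_part = root_part if 'compound' in root_part else 'compound '+root_part #attach 'compound' unless it's already there
-- 	return english, djastiz, whole_part
-- ===== SOURCE B (Python) =====
-- PAIRS = ('ng', 'th', 'dh', 'ss', 'sh', 'zh')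
-- ADJUST = {'pronoun': 'noun', 'fastener': 'modifier'}
--
-- def compound(english, components, eng_to_dja={}, pts_o_spch={}):
-- 	"""create a compound word out of several component words"""
-- 	try:
-- 		parts = [eng_to_dja[w] for w in components.split(' ')]
-- 	except KeyError as e:
-- 		raise ValueError("The word for '{}' relies on the nonexistent word for {}".format(english, e))
-- 	#a separator is decided per ADJACENT PAIR of translations, then everything is joined at once
-- 	seps = ["'" if p and q and p[-1] + q[0] in PAIRS else '' for p, q in zip(parts, parts[1:])]
-- 	djastiz = parts[0] + ''.join(s + q for s, q in zip(seps, parts[1:]))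
-- 	root = pts_o_spch[parts[-1]]
-- 	root = ADJUST.get(root, root)
-- 	whole = root if 'compound' in root else 'compound ' + root
-- 	return english, djastiz, whole
-- ===== Notes on version B (the rewrite author's own statement) =====
-- stated objective: alternative
-- what changed: B decides the apostrophe separator per ADJACENT PAIR of translated parts with a zip over (parts, parts[1:]) and then joins everything in one ''.join, instead of A's fused loop that grows the output string and re-indexes its last character at every step.
-- crash fix: On inputs whose words all translate but where an empty translation follows a nonempty one (and the last translation has a part of speech), A raises IndexError indexing the empty translation's first character, while B joins the parts (no separator around the empty part) and returns the compound. — e.g. on compound("x", "a b c", [("a", "n"), ("b", ""), ("c", "g")], [("g", "noun")]): A raises IndexError, B returns ("x", "ng", "compound noun")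
import Mathlib
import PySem

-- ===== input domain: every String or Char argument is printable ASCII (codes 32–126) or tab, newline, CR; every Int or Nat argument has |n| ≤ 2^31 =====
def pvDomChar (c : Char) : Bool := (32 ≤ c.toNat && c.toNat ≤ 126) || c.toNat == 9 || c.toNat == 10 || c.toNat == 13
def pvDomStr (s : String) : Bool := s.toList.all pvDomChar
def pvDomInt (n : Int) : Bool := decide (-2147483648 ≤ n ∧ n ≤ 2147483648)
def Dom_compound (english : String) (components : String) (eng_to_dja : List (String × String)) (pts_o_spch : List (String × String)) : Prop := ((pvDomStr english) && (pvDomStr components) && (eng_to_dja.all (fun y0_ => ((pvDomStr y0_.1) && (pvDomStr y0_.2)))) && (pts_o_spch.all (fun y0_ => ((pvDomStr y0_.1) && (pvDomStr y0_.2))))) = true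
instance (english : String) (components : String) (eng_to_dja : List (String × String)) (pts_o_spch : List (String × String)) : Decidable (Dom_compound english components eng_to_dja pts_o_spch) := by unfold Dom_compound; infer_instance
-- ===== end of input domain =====

-- B decides the apostrophe separator per adjacent pair of translated parts (a zip) and joins once,
-- instead of A's fused loop that grows the output and re-indexes its last character; objective:
-- alternative decomposition, same cost. A's exception paths are outside Pre_ below.

-- ===== PORT A =====
def aPairs : List (List Char) := [['n','g'],['t','h'],['d','h'],['s','s'],['s','h'],['z','h']]

def compound (english : String) (components : String) (eng_to_dja : List (String × String)) (pts_o_spch : List (String × String)) : String × String × String :=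
  let intermediate : List String := (PySem.Str.split? components " ").getD []
  let djastiz : List Char := intermediate.foldl
    (fun dj eng_word =>
      let t : List Char := (((PySem.Dict.mk eng_to_dja).get? eng_word).getD "").toList
      if dj ≠ [] ∧ [(PySem.List.pyGet? dj (-1)).getD ' ', (PySem.List.pyGet? t 0).getD ' '] ∈ aPairs
      then dj ++ '\'' :: t
      else dj ++ t) []
  let root_part : String := ((PySem.Dict.mk pts_o_spch).get?
      (((PySem.Dict.mk eng_to_dja).get? ((PySem.List.pyGet? intermediate (-1)).getD "")).getD "")).getD ""
  let root_part : String :=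
    if root_part = "pronoun" then "noun"
    else if root_part = "fastener" then "modifier"
    else root_part
  let whole_part : String :=
    if PySem.Str.isIn "compound" root_part then root_part
    else String.ofList ("compound ".toList ++ root_part.toList)
  (english, String.ofList djastiz, whole_part)

-- ===== PORT B =====
def bPairs : List (List Char) := [['n','g'],['t','h'],['d','h'],['s','s'],['s','h'],['z','h']]
def bAdjust : PySem.Dict String String := PySem.Dict.mk [("pronoun", "noun"), ("fastener", "modifier")]

def compound_alt (english : String) (components : String) (eng_to_dja : List (String × String)) (pts_o_spch : List (String × String)) : String × String × String :=
  let parts : List (List Char) := ((PySem.Str.split? components " ").getD []).map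
    (fun w => (((PySem.Dict.mk eng_to_dja).get? w).getD "").toList)
  let seps : List (List Char) := (parts.zip parts.tail).map
    (fun pq =>
      if pq.1 ≠ [] ∧ pq.2 ≠ [] ∧
          [(PySem.List.pyGet? pq.1 (-1)).getD ' ', (PySem.List.pyGet? pq.2 0).getD ' '] ∈ bPairs
      then ['\''] else [])
  let djastiz : List Char :=
    ((PySem.List.pyGet? parts 0).getD []) ++ ((seps.zip parts.tail).map (fun sq => sq.1 ++ sq.2)).flatten
  let root : String := ((PySem.Dict.mk pts_o_spch).get?
      (String.ofList ((PySem.List.pyGet? parts (-1)).getD []))).getD ""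
  let root : String := (bAdjust.get? root).getD root
  let whole : String :=
    if PySem.Str.isIn "compound" root then root
    else String.ofList ("compound ".toList ++ root.toList)
  (english, String.ofList djastiz, whole)

-- ===== PRECONDITION & SPEC =====
-- Pre_ excludes exactly the inputs where A raises: a word of the split without a translation
-- (ValueError), an empty translation occurring after a nonempty one (IndexError on its first
-- character), or a last translation absent from pts_o_spch (KeyError).
def Pre_compound (english : String) (components : String) (eng_to_dja : List (String × String)) (pts_o_spch : List (String × String)) : Prop :=
  let ws : List String := (PySem.Str.split? components " ").getD []
  (∀ w ∈ ws, (((PySem.Dict.mk eng_to_dja).get? w).isSome : Prop)) ∧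
  (ws.map (fun w => (((PySem.Dict.mk eng_to_dja).get? w).getD "").toList)).Pairwise
    (fun a b => b = [] → a = []) ∧
  (((PySem.Dict.mk pts_o_spch).get?
      (((PySem.Dict.mk eng_to_dja).get? ((PySem.List.pyGet? ws (-1)).getD "")).getD "")).isSome : Prop)
instance (english : String) (components : String) (eng_to_dja : List (String × String)) (pts_o_spch : List (String × String)) : Decidable (Pre_compound english components eng_to_dja pts_o_spch) := by unfold Pre_compound; infer_instance

def pvWitness_compound : String × String × (List (String × String)) × (List (String × String)) :=
  ("waterhorse", "water horse", [("water", "dul"), ("horse", "kas")], [("kas", "noun")])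

-- On inputs whose words all translate but where an empty translation follows a nonempty one,
-- A raises IndexError (indexing the empty translation's first character) while B joins the
-- parts (no separator around the empty part) and returns the compound.
def Raises_compound (english : String) (components : String) (eng_to_dja : List (String × String)) (pts_o_spch : List (String × String)) : Prop :=
  let ws : List String := (PySem.Str.split? components " ").getD []
  (∀ w ∈ ws, (((PySem.Dict.mk eng_to_dja).get? w).isSome : Prop)) ∧
  ¬ (ws.map (fun w => (((PySem.Dict.mk eng_to_dja).get? w).getD "").toList)).Pairwise
      (fun a b => b = [] → a = []) ∧
  (((PySem.Dict.mk pts_o_spch).get?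
      (((PySem.Dict.mk eng_to_dja).get? ((PySem.List.pyGet? ws (-1)).getD "")).getD "")).isSome : Prop)
instance (english : String) (components : String) (eng_to_dja : List (String × String)) (pts_o_spch : List (String × String)) : Decidable (Raises_compound english components eng_to_dja pts_o_spch) := by unfold Raises_compound; infer_instance

def pvRaiseWitness_compound : String × String × (List (String × String)) × (List (String × String)) :=
  ("x", "a b c", [("a", "n"), ("b", ""), ("c", "g")], [("g", "noun")])
def pvRaiseWitnessOut_compound : String × String × String := ("x", "ng", "compound noun")

def Spec_compound (english : String) (components : String) (eng_to_dja : List (String × String)) (pts_o_spch : List (String × String)) (out : String × String × String) : Prop := out = compound_alt english components eng_to_dja pts_o_spch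
instance (english : String) (components : String) (eng_to_dja : List (String × String)) (pts_o_spch : List (String × String)) (out : String × String × String) : Decidable (Spec_compound english components eng_to_dja pts_o_spch out) := by unfold Spec_compound; infer_instance

-- ===== CLAIM (what is proved, stated in full; the proofs are below) =====
def Claim_equal_compound : Prop := ∀ (english : String) (components : String) (eng_to_dja : List (String × String)) (pts_o_spch : List (String × String)), Dom_compound english components eng_to_dja pts_o_spch → Pre_compound english components eng_to_dja pts_o_spch → Spec_compound english components eng_to_dja pts_o_spch (compound english components eng_to_dja pts_o_spch)

def Claim_raises_compound : Prop := (∀ (english : String) (components : String) (eng_to_dja : List (String × String)) (pts_o_spch : List (String × String)), Dom_compound english components eng_to_dja pts_o_spch → Raises_compound english components eng_to_dja pts_o_spch → ¬ Pre_compound english components eng_to_dja pts_o_spch) ∧ (Dom_compound (pvRaiseWitness_compound.1) (pvRaiseWitness_compound.2.1) (pvRaiseWitness_compound.2.2.1) (pvRaiseWitness_compound.2.2.2) ∧ Raises_compound (pvRaiseWitness_compound.1) (pvRaiseWitness_compound.2.1) (pvRaiseWitness_compound.2.2.1) (pvRaiseWitness_compound.2.2.2) ∧ compound_alt (pvRaiseWitness_compound.1)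 (pvRaiseWitness_compound.2.1) (pvRaiseWitness_compound.2.2.1) (pvRaiseWitness_compound.2.2.2) = pvRaiseWitnessOut_compound)

-- ===== LEMMAS AND PROOFS =====

-- A's loop body and B's per-pair separator, on the char-list level (proof-side names).
def stepA (dj t : List Char) : List Char :=
  if dj ≠ [] ∧ [(PySem.List.pyGet? dj (-1)).getD ' ', (PySem.List.pyGet? t 0).getD ' '] ∈ aPairs
  then dj ++ '\'' :: t
  else dj ++ t

def sepC (p q : List Char) : List Char :=
  if p ≠ [] ∧ q ≠ [] ∧ [(PySem.List.pyGet? p (-1)).getD ' ', (PySem.List.pyGet? q 0).getD ' '] ∈ bPairs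
  then ['\''] else []

theorem splitOn_go_ne_nil (fuel : Nat) (sep l cur : List Char) (acc : List (List Char)) :
    PySem.Chars.splitOn.go sep fuel l cur acc ≠ [] := by
  induction fuel generalizing l cur acc with
  | zero => simp [PySem.Chars.splitOn.go]
  | succ n ih =>
    cases l with
    | nil => simp [PySem.Chars.splitOn.go]
    | cons c rest =>
      simp only [PySem.Chars.splitOn.go]
      split
      · exact ih _ _ _
      · exact ih _ _ _

theorem split_ne_nil (components : String) :
    (PySem.Str.split? components " ").getD [] ≠ [] := by
  simp only [PySem.Str.split?, PySem.Chars.split?]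
  have h : (" ".toList.isEmpty) = false := by decide
  rw [h]
  simp only [Bool.false_eq_true, if_false, Option.map_some, Option.getD_some, ne_eq,
    List.map_eq_nil_iff]
  exact splitOn_go_ne_nil _ _ _ _ _

theorem zipWith_eq_map_zip {α β γ : Type} (f : α → β → γ) :
    ∀ (xs : List α) (ys : List β), List.zipWith f xs ys = (xs.zip ys).map (fun p => f p.1 p.2) := by
  intro xs
  induction xs with
  | nil => intro ys; rfl
  | cons x xs ih => intro ys; cases ys with
    | nil => rfl
    | cons y ys => simp [List.zip_cons_cons, ih]

theorem zip_seps_eq {α : Type} (f : List α → List α → List α) :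
    ∀ (xs ys : List (List α)),
      (((List.zipWith f xs ys).zip ys).map (fun sq => sq.1 ++ sq.2)) =
        List.zipWith (fun a b => f a b ++ b) xs ys := by
  intro xs
  induction xs with
  | nil => intro ys; rfl
  | cons x xs ih => intro ys; cases ys with
    | nil => rfl
    | cons y ys => simp only [List.zipWith_cons_cons, List.zip_cons_cons, List.map_cons, ih]

-- step of A, rewritten as a pairwise separator when the previous part is nonempty
theorem stepA_eq_sep (dj p q : List Char) (hp : p ≠ []) (hq : q ≠ []) :
    stepA (dj ++ p) q = dj ++ p ++ sepC p q ++ q := by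
  have hAB : bPairs = aPairs := rfl
  have hlast : PySem.List.pyGet? (dj ++ p) (-1) = PySem.List.pyGet? p (-1) := by
    rw [PySem.List.pyGet?_neg_one, PySem.List.pyGet?_neg_one,
      List.getLast?_append_of_ne_nil _ hp]
  have hentry : (dj ++ p ≠ []) := by simp [hp]
  unfold stepA sepC
  rw [hlast]
  by_cases hmem : [(PySem.List.pyGet? p (-1)).getD ' ', (PySem.List.pyGet? q 0).getD ' '] ∈ aPairs
  · rw [if_pos ⟨hentry, hmem⟩, if_pos ⟨hp, hq, hAB ▸ hmem⟩]
    simp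
  · rw [if_neg (fun h => hmem h.2), if_neg (fun h => hmem (hAB ▸ h.2.2))]
    simp

-- main regime: once a nonempty part has been emitted, A's fold is the pairwise join
theorem fold_main (tl : List (List Char)) (hne : ∀ q ∈ tl, q ≠ []) :
    ∀ (dj p : List Char), p ≠ [] →
      tl.foldl stepA (dj ++ p) =
        dj ++ p ++ (List.zipWith (fun a b => sepC a b ++ b) (p :: tl) tl).flatten := by
  induction tl with
  | nil => intro dj p _; simp
  | cons q rest ih =>
    intro dj p hp
    have hq : q ≠ [] := hne q List.mem_cons_self
    have hrest : ∀ r ∈ rest, r ≠ [] := fun r hr => hne r (List.mem_cons_of_mem _ hr)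
    have h1 : stepA (dj ++ p) q = (dj ++ p ++ sepC p q) ++ q := by
      rw [stepA_eq_sep dj p q hp hq]
    simp only [List.foldl_cons, h1, ih hrest (dj ++ p ++ sepC p q) q hq,
      List.zipWith_cons_cons, List.flatten_cons]
    simp [List.append_assoc]

-- full characterisation: A's fold from the empty string equals B's first-part + pairwise join
theorem fold_eq_join (tl : List (List Char))
    (hpw : tl.Pairwise (fun a b => b = [] → a = [])) :
    tl.foldl stepA [] =
      ((PySem.List.pyGet? tl 0).getD []) ++
        (List.zipWith (fun a b => sepC a b ++ b) tl tl.tail).flatten := by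
  induction tl with
  | nil => rfl
  | cons p rest ih =>
    rcases List.pairwise_cons.mp hpw with ⟨hhead, hrest⟩
    by_cases hp : p = []
    · subst hp
      have h0 : stepA [] [] = [] := by simp [stepA]
      have := ih hrest
      simp only [List.foldl_cons, h0, this]
      cases rest with
      | nil => rfl
      | cons q r =>
        have hsep : sepC [] q = [] := by simp [sepC]
        simp [PySem.List.pyGet?_zero, hsep]
    · have hrestne : ∀ q ∈ rest, q ≠ [] := fun q hq he => hp (hhead q hq he)
      have h0 : stepA [] p = [] ++ p := by simp [stepA]
      simp only [List.foldl_cons, h0]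
      rw [fold_main rest hrestne [] p hp]
      simp

theorem adjust_eq (root : String) :
    (bAdjust.get? root).getD root =
      (if root = "pronoun" then "noun" else if root = "fastener" then "modifier" else root) := by
  by_cases h1 : root = "pronoun"
  · subst h1; rfl
  · by_cases h2 : root = "fastener"
    · subst h2; rfl
    · have e1 : (("pronoun" : String) == root) = false := by
        rw [beq_eq_false_iff_ne]; exact fun e => h1 e.symm
      have e2 : (("fastener" : String) == root) = false := by
        rw [beq_eq_false_iff_ne]; exact fun e => h2 e.symm
      simp only [bAdjust, PySem.Dict.get?_mk_cons, e1, e2, if_neg h1, if_neg h2,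
        Bool.false_eq_true, if_false]
      rfl

-- ===== VERDICT (by name: the statement is the Claim_ definition above) =====
theorem compound_spec : Claim_equal_compound := by
  intro english components eng_to_dja pts_o_spch _hdom hpre
  unfold Spec_compound compound compound_alt
  obtain ⟨hsome, hpw, _hpts⟩ := hpre
  set ws : List String := (PySem.Str.split? components " ").getD [] with hws
  have hwsne : ws ≠ [] := split_ne_nil components
  set tl : List (List Char) :=
    ws.map (fun w => (((PySem.Dict.mk eng_to_dja).get? w).getD "").toList) with htl
  -- the djastiz strings agree
  have hfoldA : ws.foldl
      (fun dj eng_word =>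
        let t : List Char := (((PySem.Dict.mk eng_to_dja).get? eng_word).getD "").toList
        if dj ≠ [] ∧ [(PySem.List.pyGet? dj (-1)).getD ' ', (PySem.List.pyGet? t 0).getD ' '] ∈ aPairs
        then dj ++ '\'' :: t
        else dj ++ t) [] = tl.foldl stepA [] := by
    rw [htl, List.foldl_map]; rfl
  have hseps :
      ((tl.zip tl.tail).map
        (fun pq =>
          if pq.1 ≠ [] ∧ pq.2 ≠ [] ∧
              [(PySem.List.pyGet? pq.1 (-1)).getD ' ', (PySem.List.pyGet? pq.2 0).getD ' '] ∈ bPairs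
          then ['\''] else [])) = List.zipWith sepC tl tl.tail := by
    rw [zipWith_eq_map_zip]; rfl
  have hjoin := fold_eq_join tl hpw
  -- the part-of-speech keys agree
  have hlastw : String.ofList ((PySem.List.pyGet? tl (-1)).getD []) =
      ((PySem.Dict.mk eng_to_dja).get? ((PySem.List.pyGet? ws (-1)).getD "")).getD "" := by
    rw [htl, PySem.List.pyGet?_neg_one, PySem.List.pyGet?_neg_one, List.getLast?_map]
    rw [List.getLast?_eq_some_getLast (h := hwsne)]
    simp
  simp only [hfoldA, hjoin, hseps, zip_seps_eq, hlastw, adjust_eq]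

theorem compound_raises : Claim_raises_compound := by
  unfold Claim_raises_compound
  constructor
  · intro english components eng_to_dja pts_o_spch _hdom hraises hpre
    exact hraises.2.1 hpre.2.1
  · exact ⟨by decide, by decide, by decide⟩

-- self-check: B's port really returns the stated literal at the raise witness (uses compound_raises)
theorem pvRaiseWitness_value_ok :
    compound_alt pvRaiseWitness_compound.1 pvRaiseWitness_compound.2.1
      pvRaiseWitness_compound.2.2.1 pvRaiseWitness_compound.2.2.2 = pvRaiseWitnessOut_compound :=
  compound_raises.2.2.2
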